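-- pv_equiv track=rewrite | github.com/tonghuikang/codecomp | template/g.py | sum_product_triplet
-- ===== SOURCE A (Python) =====
-- def sum_product_triplet(arr):
--     dp = [x for x in arr]
--
--     for _ in range(2):
--         cursum = sum(dp)
--         new_dp = [0 for _ in arr]
--         for i,x in enumerate(arr):
--             cursum -= dp[i]
--             new_dp[i] = x*cursum
--         dp = new_dp
--         # log(dp)
--     return sum(dp)
-- ===== SOURCE B (Python) =====
-- def sum_product_triplet(arr):
--     e1 = e2 = e3 = 0
--     for x in arr:
--         e3 += e2 * x
--         e2 += e1 * x
--         e1 += x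
--     return e3
-- ===== Notes on version B (the rewrite author's own statement) =====
-- stated objective: faster
-- what changed: Replaces A's two suffix-sum passes building intermediate lists with a single left-to-right pass maintaining three running symmetric-sum accumulators (e3 += e2*x; e2 += e1*x; e1 += x), allocating nothing.
import Mathlib
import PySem

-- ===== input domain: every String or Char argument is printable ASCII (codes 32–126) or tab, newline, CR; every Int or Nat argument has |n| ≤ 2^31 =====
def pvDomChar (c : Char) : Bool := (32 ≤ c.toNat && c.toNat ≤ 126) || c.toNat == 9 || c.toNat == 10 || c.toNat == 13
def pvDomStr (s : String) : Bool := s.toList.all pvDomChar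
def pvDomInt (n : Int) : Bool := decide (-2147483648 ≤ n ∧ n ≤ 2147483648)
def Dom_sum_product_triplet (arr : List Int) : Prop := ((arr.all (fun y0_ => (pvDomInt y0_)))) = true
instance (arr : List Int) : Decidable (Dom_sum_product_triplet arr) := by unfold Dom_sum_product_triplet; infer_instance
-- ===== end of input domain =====

-- B changes A's two suffix-sum passes into one pass with three accumulators (objective: faster, constant-factor).

-- ===== PORT A =====
-- inner loop of A: walks (arr[i], dp[i]) pairs, updating cursum and appending x*cursum to new_dp
def pvPassLoop (pairs : List (Int × Int)) (cursum : Int) (newdp : List Int) : List Int :=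
  match pairs with
  | [] => newdp
  | (x, d) :: rest => pvPassLoop rest (cursum - d) (newdp ++ [x * (cursum - d)])

-- one iteration of A's outer 'for _ in range(2)' loop
def pvPass (arr dp : List Int) : List Int :=
  pvPassLoop (arr.zip dp) dp.sum []

def sum_product_triplet (arr : List Int) : Int :=
  let dp := arr.map (fun x => x)
  let dp1 := pvPass arr dp
  let dp2 := pvPass arr dp1
  dp2.sum

-- ===== PORT B =====
def sum_product_triplet_alt (arr : List Int) : Int :=
  (arr.foldl (fun (s : Int × Int × Int) x =>
      (s.1 + x, s.2.1 + s.1 * x, s.2.2 + s.2.1 * x)) (0, 0, 0)).2.2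

-- ===== PRECONDITION & SPEC =====
def Spec_sum_product_triplet (arr : List Int) (out : Int) : Prop := out = sum_product_triplet_alt arr
instance (arr : List Int) (out : Int) : Decidable (Spec_sum_product_triplet arr out) := by unfold Spec_sum_product_triplet; infer_instance

-- ===== CLAIM (what is proved, stated in full; the proofs are below) =====
def Claim_equal_sum_product_triplet : Prop := ∀ (arr : List Int), Dom_sum_product_triplet arr → Spec_sum_product_triplet arr (sum_product_triplet arr)

-- ===== LEMMAS AND PROOFS =====

-- spec helpers: p1 xs lists x_i * (sum of later elements); e3 is the triple sum
def pvP1 : List Int → List Int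
  | [] => []
  | x :: t => x * t.sum :: pvP1 t

def pvE3 : List Int → Int
  | [] => 0
  | x :: t => x * (pvP1 t).sum + pvE3 t

theorem pvPassLoop_acc (ps : List (Int × Int)) (c : Int) (acc : List Int) :
    pvPassLoop ps c acc = acc ++ pvPassLoop ps c [] := by
  induction ps generalizing c acc with
  | nil => simp [pvPassLoop]
  | cons p rest ih =>
    obtain ⟨x, d⟩ := p
    rw [pvPassLoop, pvPassLoop, ih (c - d) (acc ++ [x * (c - d)]), ih (c - d) ([] ++ [x * (c - d)])]
    simp

theorem pvPassLoop_cons (x d c : Int) (ps : List (Int × Int)) :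
    pvPassLoop ((x, d) :: ps) c [] = x * (c - d) :: pvPassLoop ps (c - d) [] := by
  rw [pvPassLoop, pvPassLoop_acc]; simp

theorem pvPass_self (arr : List Int) : pvPass arr arr = pvP1 arr := by
  induction arr with
  | nil => simp [pvPass, pvPassLoop, pvP1]
  | cons x t ih =>
    rw [pvP1, ← ih]
    show pvPassLoop ((x, x) :: t.zip t) (x :: t).sum [] = _
    rw [pvPassLoop_cons]
    simp [pvPass]

theorem pvPass_p1 (arr : List Int) : (pvPass arr (pvP1 arr)).sum = pvE3 arr := by
  induction arr with
  | nil => simp [pvPass, pvPassLoop, pvE3]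
  | cons x t ih =>
    rw [pvE3, ← ih]
    show (pvPassLoop ((x, x * t.sum) :: t.zip (pvP1 t)) (pvP1 (x :: t)).sum []).sum = _
    rw [pvPassLoop_cons, pvP1]
    simp [pvPass]

theorem pvFoldB (xs : List Int) (a b c : Int) :
    (xs.foldl (fun (s : Int × Int × Int) x =>
        (s.1 + x, s.2.1 + s.1 * x, s.2.2 + s.2.1 * x)) (a, b, c)).2.2
      = c + b * xs.sum + a * (pvP1 xs).sum + pvE3 xs := by
  induction xs generalizing a b c with
  | nil => simp [pvP1, pvE3]
  | cons x t ih =>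
    rw [List.foldl_cons, ih, pvP1, pvE3]
    simp
    ring

-- ===== VERDICT (by name: the statement is the Claim_ definition above) =====
theorem sum_product_triplet_spec : Claim_equal_sum_product_triplet := by
  intro arr _
  unfold Spec_sum_product_triplet sum_product_triplet sum_product_triplet_alt
  simp only [List.map_id_fun', pvFoldB]
  rw [show id arr = arr from rfl, pvPass_self, pvPass_p1]
  ring
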